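-- pv_equiv track=rewrite | github.com/cankorkmaz715-boop/amazon-research-tool | src/amazon_research/market_entry_signals/engine.py | _count_by_market_from_strategy
-- ===== SOURCE A (Python) =====
-- from typing import Any, Dict, List, Optional
--
-- def _extract_market(ref: str) -> str:
--     """Extract market code from opportunity_ref (e.g. DE:B08 -> DE)."""
--     r = (ref or "").strip()
--     if ":" in r:
--         return r.split(":", 1)[0].strip().upper() or "DE"
--     return "DE"
--
-- def _count_by_market_from_strategy(strategy: Dict[str, Any]) -> Dict[str, Dict[str, int]]:
--     """Return per-market counts: prioritized, monitor, deprioritized."""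
--     out: Dict[str, Dict[str, int]] = {}
--     for lst_key, count_key in (
--         ("prioritized_opportunities", "prioritized"),
--         ("monitor_opportunities", "monitor"),
--         ("deprioritized_opportunities", "deprioritized"),
--     ):
--         for opp in strategy.get(lst_key) or []:
--             ref = (opp.get("opportunity_id") or "").strip()
--             if not ref:
--                 continue
--             m = _extract_market(ref)
--             if m not in out:
--                 out[m] = {"prioritized": 0, "monitor": 0, "deprioritized": 0}
--             out[m][count_key] = out[m].get(count_key, 0) + 1
--     return out
-- ===== SOURCE B (Python) =====
-- def _extract_market(ref: str) -> str:
--     """Extract market code from opportunity_ref (e.g. DE:B08 -> DE)."""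
--     r = (ref or "").strip()
--     if ":" in r:
--         return r.split(":", 1)[0].strip().upper() or "DE"
--     return "DE"
--
-- def _count_by_market_from_strategy(strategy):
--     """Two-pass: first tally a flat (market, category) -> count table, then fold it into the nested per-market dict."""
--     cats = ("prioritized", "monitor", "deprioritized")
--     flat = {}
--     for cat in cats:
--         for opp in strategy.get(cat + "_opportunities") or []:
--             rid = (opp.get("opportunity_id") or "").strip()
--             if rid:
--                 k = (_extract_market(rid), cat)
--                 flat[k] = flat.get(k, 0) + 1
--     out = {}
--     for (m, cat), n in flat.items():
--         if m not in out:
--             out[m] = dict.fromkeys(cats, 0)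
--         out[m][cat] = n
--     return out
-- ===== Notes on version B (the rewrite author's own statement) =====
-- stated objective: alternative
-- what changed: B replaces A's single pass that mutates nested per-market dicts with two separate phases: phase one tallies a flat dict keyed by (market, category) tuples, phase two folds that flat table (in insertion order) into the nested per-market dict, initialising each market's inner dict on first sight.
import Mathlib
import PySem

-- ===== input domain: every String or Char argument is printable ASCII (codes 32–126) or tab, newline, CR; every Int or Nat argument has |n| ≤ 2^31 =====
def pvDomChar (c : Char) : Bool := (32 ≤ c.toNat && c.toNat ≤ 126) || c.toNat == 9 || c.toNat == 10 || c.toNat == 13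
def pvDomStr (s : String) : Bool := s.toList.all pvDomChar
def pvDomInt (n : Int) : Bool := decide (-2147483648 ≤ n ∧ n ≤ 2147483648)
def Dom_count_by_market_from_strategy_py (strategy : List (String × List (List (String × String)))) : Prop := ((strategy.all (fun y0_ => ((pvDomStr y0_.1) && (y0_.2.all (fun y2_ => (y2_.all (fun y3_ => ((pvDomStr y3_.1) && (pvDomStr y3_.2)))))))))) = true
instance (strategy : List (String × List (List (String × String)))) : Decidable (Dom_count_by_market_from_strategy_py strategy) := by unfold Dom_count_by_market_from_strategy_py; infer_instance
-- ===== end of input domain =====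

-- B replaces A's single pass that mutates nested per-market dicts with two separate phases: a flat
-- (market, category) -> count tally, then a fold of that flat table into the nested dict. Alternative
-- decomposition, same asymptotic cost; return values proved equal on all inputs in the domain.

-- ===== PORT A =====
-- literal transliteration of _extract_market (helper used unchanged by both Pythons)
def pvExtractMarket (ref : String) : String :=
  let r := PySem.Str.strip ref
  if PySem.Str.isIn ":" r then
    let head := ((PySem.Str.splitMax? r ":" 1).getD []).getD 0 ""
    let res := PySem.Str.upper (PySem.Str.strip head)
    if res = "" then "DE" else res
  else "DE"

def count_by_market_from_strategy_py (strategy : List (String × List (List (String × String)))) : List (String × List (String × Int)) :=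
  let out : PySem.Dict String (PySem.Dict String Int) :=
    ([("prioritized_opportunities", "prioritized"),
      ("monitor_opportunities", "monitor"),
      ("deprioritized_opportunities", "deprioritized")] : List (String × String)).foldl (fun out pk =>
      (((PySem.Dict.mk strategy).get? pk.1).getD []).foldl (fun out opp =>
        let ref := PySem.Str.strip (((PySem.Dict.mk opp).get? "opportunity_id").getD "")
        if ref = "" then out
        else
          let m := pvExtractMarket ref
          let out1 := if out.contains m then out
            else out.insert m (PySem.Dict.ofList [("prioritized", 0), ("monitor", 0), ("deprioritized", 0)])
          out1.insert m ((out1.getD m (PySem.Dict.mk [])).insert pk.2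
            ((out1.getD m (PySem.Dict.mk [])).getD pk.2 0 + 1))) out) PySem.Dict.empty
  out.items.map (fun p => (p.1, p.2.items))

-- ===== PORT B =====
def pvCats : List String := ["prioritized", "monitor", "deprioritized"]

def count_by_market_from_strategy_py_alt (strategy : List (String × List (List (String × String)))) : List (String × List (String × Int)) :=
  let flat : PySem.Dict (String × String) Int :=
    pvCats.foldl (fun flat cat =>
      (((PySem.Dict.mk strategy).get? (cat ++ "_opportunities")).getD []).foldl (fun flat opp =>
        let rid := PySem.Str.strip (((PySem.Dict.mk opp).get? "opportunity_id").getD "")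
        if rid = "" then flat
        else
          let k := (pvExtractMarket rid, cat)
          flat.insert k (flat.getD k 0 + 1)) flat) PySem.Dict.empty
  let out : PySem.Dict String (PySem.Dict String Int) :=
    flat.items.foldl (fun out e =>
      let out1 := if out.contains e.1.1 then out
        else out.insert e.1.1 (PySem.Dict.ofList (pvCats.map (fun c => (c, 0))))
      out1.insert e.1.1 ((out1.getD e.1.1 (PySem.Dict.mk [])).insert e.1.2 e.2)) PySem.Dict.empty
  out.items.map (fun p => (p.1, p.2.items))

-- ===== PRECONDITION & SPEC =====
def Spec_count_by_market_from_strategy_py (strategy : List (String × List (List (String × String)))) (out : List (String × List (String × Int))) : Prop := out = count_by_market_from_strategy_py_alt strategy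
instance (strategy : List (String × List (List (String × String)))) (out : List (String × List (String × Int))) : Decidable (Spec_count_by_market_from_strategy_py strategy out) := by unfold Spec_count_by_market_from_strategy_py; infer_instance

-- ===== CLAIM (what is proved, stated in full; the proofs are below) =====
def Claim_equal_count_by_market_from_strategy_py : Prop := ∀ (strategy : List (String × List (List (String × String)))), Dom_count_by_market_from_strategy_py strategy → Spec_count_by_market_from_strategy_py strategy (count_by_market_from_strategy_py strategy)

-- ===== LEMMAS AND PROOFS =====

theorem pv_get?_mk_map {ν : Type} (l : List String) (f : String → ν) (m : String) (h : m ∈ l) :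
    (PySem.Dict.mk (l.map (fun x => (x, f x)))).get? m = some (f m) := by
  induction l with
  | nil => simp at h
  | cons a t ih =>
    simp only [List.map_cons, PySem.Dict.get?_mk_cons]
    by_cases ha : a = m
    · simp [ha]
    · simp only [List.mem_cons] at h
      simp [ha, ih (h.resolve_left (fun hh => ha hh.symm))]

theorem pv_get?_mk_append {ν : Type} (ps : List (String × ν)) (m : String) (v : ν)
    (h : ∀ p ∈ ps, p.1 ≠ m) : (PySem.Dict.mk (ps ++ [(m, v)])).get? m = some v := by
  induction ps with
  | nil => rw [List.nil_append, PySem.Dict.get?_mk_cons]; simp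
  | cons a t ih =>
    rw [List.cons_append, PySem.Dict.get?_mk_cons]
    have := h a (by simp)
    simp [this, ih (fun p hp => h p (by simp [hp]))]

theorem pv_contains_mk_map {ν : Type} (l : List String) (f : String → ν) (m : String) :
    (PySem.Dict.mk (l.map (fun x => (x, f x)))).contains m = decide (m ∈ l) := by
  simp [PySem.Dict.contains_mk, List.any_map, Function.comp_def, List.any_beq']

theorem pv_insert_mk_map {ν : Type} (l : List String) (f : String → ν) (m : String) (v : ν)
    (h : m ∈ l) :
    (PySem.Dict.mk (l.map (fun x => (x, f x)))).insert m v
      = PySem.Dict.mk (l.map (fun x => (x, if x = m then v else f x))) := by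
  have hc : (PySem.Dict.mk (l.map (fun x => (x, f x)))).contains m = true := by
    rw [pv_contains_mk_map]; simpa using h
  have hitems := PySem.Dict.items_insert (PySem.Dict.mk (l.map (fun x => (x, f x)))) m v
  rw [hc] at hitems
  have : ((PySem.Dict.mk (l.map (fun x => (x, f x)))).insert m v).items
      = (l.map (fun x => (x, if x = m then v else f x))) := by
    rw [hitems]
    show List.map _ (l.map (fun x => (x, f x))) = _
    rw [List.map_map]
    apply List.map_congr_left
    intro x _
    by_cases hx : x = m <;> simp [hx]
  cases hd : (PySem.Dict.mk (l.map (fun x => (x, f x)))).insert m v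
  rw [hd] at this; simpa using this

theorem pv_dict_eq_of_items {κ ν : Type} (d : PySem.Dict κ ν) (l : List (κ × ν)) (h : d.items = l) :
    d = PySem.Dict.mk l := by cases d; simpa using h

def pvInit : PySem.Dict String Int :=
  PySem.Dict.mk [("prioritized", 0), ("monitor", 0), ("deprioritized", 0)]

def pvAStep (out : PySem.Dict String (PySem.Dict String Int)) (e : String × String) :
    PySem.Dict String (PySem.Dict String Int) :=
  let out1 := if out.contains e.1 then out else out.insert e.1 pvInit
  out1.insert e.1 ((out1.getD e.1 (PySem.Dict.mk [])).insert e.2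
    ((out1.getD e.1 (PySem.Dict.mk [])).getD e.2 0 + 1))

def pvCanon (E : List (String × String)) : PySem.Dict String (PySem.Dict String Int) :=
  PySem.Dict.mk ((PySem.List.dedup (E.map Prod.fst)).map (fun m =>
    (m, PySem.Dict.mk (pvCats.map (fun c => (c, (E.count (m, c) : Int)))))))

theorem pvInit_eq : pvInit = PySem.Dict.mk (pvCats.map (fun c => (c, (0 : Int)))) := rfl

theorem pv_stepA_canon (E : List (String × String)) (e : String × String) (hc : e.2 ∈ pvCats) :
    pvAStep (pvCanon E) e = pvCanon (E ++ [e]) := by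
  obtain ⟨m, c⟩ := e
  simp only at hc
  have hL : PySem.List.dedup ((E ++ [(m, c)]).map Prod.fst)
      = PySem.Set.add (PySem.List.dedup (E.map Prod.fst)) m := by
    simp [PySem.List.dedup_eq_ofList, PySem.Set.ofList_append_singleton]
  have hcnt : ∀ (k : String × String), List.count k (E ++ [(m, c)])
      = List.count k E + (if k = (m, c) then 1 else 0) := by
    intro k
    rw [List.count_append]
    by_cases hk : k = (m, c)
    · subst hk; simp
    · simp [hk, Ne.symm hk]
  by_cases hm : m ∈ E.map Prod.fst
  · have hmL : m ∈ PySem.List.dedup (E.map Prod.fst) := (PySem.List.mem_dedup _ _).mpr hm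
    have hcont : (pvCanon E).contains m = true := by
      unfold pvCanon; rw [pv_contains_mk_map]; simpa using hmL
    have hget : (pvCanon E).getD m (PySem.Dict.mk [])
        = PySem.Dict.mk (pvCats.map (fun c' => (c', (E.count (m, c') : Int)))) := by
      unfold pvCanon
      rw [PySem.Dict.getD_eq_get?_getD, pv_get?_mk_map _ _ _ hmL]
      rfl
    have hgetc : (PySem.Dict.mk (pvCats.map (fun c' => (c', (E.count (m, c') : Int))))).getD c 0
        = (E.count (m, c) : Int) := by
      rw [PySem.Dict.getD_eq_get?_getD, pv_get?_mk_map _ _ _ hc]; rfl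
    unfold pvAStep
    simp only [hcont, if_true, hget, hgetc]
    rw [pv_insert_mk_map _ _ _ _ hc]
    unfold pvCanon
    rw [pv_insert_mk_map _ _ _ _ hmL]
    rw [hL, PySem.Set.add_of_mem hmL]
    congr 1
    apply List.map_congr_left
    intro m' hm'
    by_cases hmm : m' = m
    · subst hmm
      rw [if_pos rfl]
      congr 2
      apply List.map_congr_left
      intro c' hc'
      by_cases hcc : c' = c
      · subst hcc; simp [hcnt]
      · have hne2 : ((m', c') : String × String) ≠ (m', c) := by simp [hcc]
        simp [hcnt, hne2, hcc]
    · rw [if_neg hmm]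
      congr 2
      apply List.map_congr_left
      intro c' _
      have hne2 : ((m', c') : String × String) ≠ (m, c) := by simp [Prod.ext_iff, hmm]
      simp [hcnt, hne2]
  · have hmL : m ∉ PySem.List.dedup (List.map Prod.fst E) := fun h => hm ((PySem.List.mem_dedup _ _).mp h)
    have hcont : (pvCanon E).contains m = false := by
      unfold pvCanon; rw [pv_contains_mk_map]; simpa using hmL
    have hout1 : (pvCanon E).insert m pvInit
        = PySem.Dict.mk ((PySem.List.dedup (List.map Prod.fst E)).map (fun m' =>
            (m', PySem.Dict.mk (pvCats.map (fun c' => (c', (E.count (m', c') : Int)))))) ++ [(m, pvInit)]) := by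
      apply pv_dict_eq_of_items
      rw [PySem.Dict.items_insert, hcont]
      simp [pvCanon]
    have hne : ∀ p ∈ (PySem.List.dedup (List.map Prod.fst E)).map (fun m' =>
            (m', PySem.Dict.mk (pvCats.map (fun c' => (c', (E.count (m', c') : Int)))))), p.1 ≠ m := by
      intro p hp
      obtain ⟨m', hm', rfl⟩ := List.mem_map.mp hp
      intro hpm; exact hmL (hpm ▸ hm')
    have hget : (PySem.Dict.mk ((PySem.List.dedup (List.map Prod.fst E)).map (fun m' =>
            (m', PySem.Dict.mk (pvCats.map (fun c' => (c', (E.count (m', c') : Int)))))) ++ [(m, pvInit)])).getD m (PySem.Dict.mk [])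
        = pvInit := by
      rw [PySem.Dict.getD_eq_get?_getD, pv_get?_mk_append _ _ _ hne]; rfl
    have hgetc : pvInit.getD c 0 = 0 := by
      rw [pvInit_eq, PySem.Dict.getD_eq_get?_getD, pv_get?_mk_map _ _ _ hc]; rfl
    unfold pvAStep
    simp only [hcont, Bool.false_eq_true, if_false, hout1, hget, hgetc]
    rw [pvInit_eq, pv_insert_mk_map _ _ _ _ hc]
    have hcont2 : (PySem.Dict.mk ((PySem.List.dedup (List.map Prod.fst E)).map (fun m' =>
            (m', PySem.Dict.mk (pvCats.map (fun c' => (c', (E.count (m', c') : Int)))))) ++ [(m, PySem.Dict.mk (pvCats.map (fun c => (c, (0 : Int)))))])).contains m = true := by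
      simp [PySem.Dict.contains_mk]
    unfold pvCanon
    apply pv_dict_eq_of_items
    rw [PySem.Dict.items_insert, hcont2, if_pos rfl]
    rw [List.map_append]
    rw [hL, PySem.Set.add_of_not_mem hmL, List.map_append]
    congr 1
    · rw [List.map_map]
      apply List.map_congr_left
      intro m' hm'
      have hmm : m' ≠ m := fun h => hmL (h ▸ hm')
      simp only [Function.comp_apply, beq_iff_eq, hmm, if_false]
      congr 2
      apply List.map_congr_left
      intro c' _
      have hne2 : ((m', c') : String × String) ≠ (m, c) := by simp [Prod.ext_iff, hmm]
      simp [hcnt, hne2]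
    · have hzero : ∀ c', List.count ((m, c') : String × String) E = 0 := by
        intro c'
        rw [List.count_eq_zero]
        intro hmem
        exact hm (List.mem_map.mpr ⟨(m, c'), hmem, rfl⟩)
      simp only [List.map_cons, List.map_nil, beq_self_eq_true, if_true]
      congr 3
      apply List.map_congr_left
      intro c' _
      by_cases hcc : c' = c
      · subst hcc; simp [hcnt, hzero]
      · have hne2 : ((m, c') : String × String) ≠ (m, c) := by simp [hcc]
        simp [hcnt, hne2, hzero, hcc]

def pvBStep (out : PySem.Dict String (PySem.Dict String Int)) (e : (String × String) × Int) :
    PySem.Dict String (PySem.Dict String Int) :=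
  let out1 := if out.contains e.1.1 then out else out.insert e.1.1 pvInit
  out1.insert e.1.1 ((out1.getD e.1.1 (PySem.Dict.mk [])).insert e.1.2 e.2)

def pvLook : List ((String × String) × Int) → (String × String) → Int
  | [], _ => 0
  | p :: t, k => if p.1 = k then p.2 else pvLook t k

def pvCanonB (l : List ((String × String) × Int)) : PySem.Dict String (PySem.Dict String Int) :=
  PySem.Dict.mk ((PySem.List.dedup (l.map (fun p => p.1.1))).map (fun m =>
    (m, PySem.Dict.mk (pvCats.map (fun c => (c, pvLook l (m, c)))))))

theorem pvLook_eq_zero (l : List ((String × String) × Int)) (k : String × String)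
    (h : k ∉ l.map Prod.fst) : pvLook l k = 0 := by
  induction l with
  | nil => rfl
  | cons p t ih =>
    simp only [List.map_cons, List.mem_cons, not_or] at h
    simp only [pvLook]
    rw [if_neg (fun hh => h.1 hh.symm), ih h.2]

theorem pvLook_append (l : List ((String × String) × Int)) (k : String × String) (n : Int)
    (k' : String × String) (hk : k ∉ l.map Prod.fst) :
    pvLook (l ++ [(k, n)]) k' = if k' = k then n else pvLook l k' := by
  induction l with
  | nil =>
    simp only [List.nil_append, pvLook]
    by_cases h : k = k'
    · subst h; simp
    · rw [if_neg h, if_neg (fun hh => h hh.symm)]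
  | cons p t ih =>
    simp only [List.map_cons, List.mem_cons, not_or] at hk
    simp only [List.cons_append, pvLook]
    by_cases h : p.1 = k'
    · rw [if_pos h, if_pos h]
      rw [if_neg (fun hh : k' = k => hk.1 (h.trans hh).symm)]
    · rw [if_neg h, if_neg h, ih hk.2]

theorem pv_stepB_canon (l : List ((String × String) × Int)) (k : String × String) (n : Int)
    (hk : k ∉ l.map Prod.fst) (hc : k.2 ∈ pvCats) :
    pvBStep (pvCanonB l) (k, n) = pvCanonB (l ++ [(k, n)]) := by
  obtain ⟨m, c⟩ := k
  simp only at hc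
  have hL : PySem.List.dedup ((l ++ [((m, c), n)]).map (fun p => p.1.1))
      = PySem.Set.add (PySem.List.dedup (l.map (fun p => p.1.1))) m := by
    simp [PySem.List.dedup_eq_ofList, PySem.Set.ofList_append_singleton]
  have hlook : ∀ k', pvLook (l ++ [((m, c), n)]) k' = if k' = (m, c) then n else pvLook l k' :=
    fun k' => pvLook_append l (m, c) n k' hk
  by_cases hm : m ∈ l.map (fun p => p.1.1)
  · have hmL : m ∈ PySem.List.dedup (l.map (fun p => p.1.1)) := (PySem.List.mem_dedup _ _).mpr hm
    have hcont : (pvCanonB l).contains m = true := by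
      unfold pvCanonB; rw [pv_contains_mk_map]; simpa using hmL
    have hget : (pvCanonB l).getD m (PySem.Dict.mk [])
        = PySem.Dict.mk (pvCats.map (fun c' => (c', pvLook l (m, c')))) := by
      unfold pvCanonB
      rw [PySem.Dict.getD_eq_get?_getD, pv_get?_mk_map _ _ _ hmL]
      rfl
    unfold pvBStep
    simp only [hcont, if_true, hget]
    rw [pv_insert_mk_map _ _ _ _ hc]
    unfold pvCanonB
    rw [pv_insert_mk_map _ _ _ _ hmL]
    rw [hL, PySem.Set.add_of_mem hmL]
    congr 1
    apply List.map_congr_left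
    intro m' hm'
    by_cases hmm : m' = m
    · subst hmm
      rw [if_pos rfl]
      congr 2
      apply List.map_congr_left
      intro c' hc'
      by_cases hcc : c' = c
      · subst hcc; simp [hlook]
      · have hne2 : ((m', c') : String × String) ≠ (m', c) := by simp [hcc]
        simp [hlook, hne2, hcc]
    · rw [if_neg hmm]
      congr 2
      apply List.map_congr_left
      intro c' _
      have hne2 : ((m', c') : String × String) ≠ (m, c) := by simp [Prod.ext_iff, hmm]
      simp [hlook, hne2]
  · have hmL : m ∉ PySem.List.dedup (l.map (fun p => p.1.1)) := fun h => hm ((PySem.List.mem_dedup _ _).mp h)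
    have hcont : (pvCanonB l).contains m = false := by
      unfold pvCanonB; rw [pv_contains_mk_map]; simpa using hmL
    have hout1 : (pvCanonB l).insert m pvInit
        = PySem.Dict.mk ((PySem.List.dedup (l.map (fun p => p.1.1))).map (fun m' =>
            (m', PySem.Dict.mk (pvCats.map (fun c' => (c', pvLook l (m', c')))))) ++ [(m, pvInit)]) := by
      apply pv_dict_eq_of_items
      rw [PySem.Dict.items_insert, hcont]
      simp [pvCanonB]
    have hne : ∀ p ∈ (PySem.List.dedup (l.map (fun p => p.1.1))).map (fun m' =>
            (m', PySem.Dict.mk (pvCats.map (fun c' => (c', pvLook l (m', c')))))), p.1 ≠ m := by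
      intro p hp
      obtain ⟨m', hm', rfl⟩ := List.mem_map.mp hp
      intro hpm; exact hmL (hpm ▸ hm')
    have hget : (PySem.Dict.mk ((PySem.List.dedup (l.map (fun p => p.1.1))).map (fun m' =>
            (m', PySem.Dict.mk (pvCats.map (fun c' => (c', pvLook l (m', c')))))) ++ [(m, pvInit)])).getD m (PySem.Dict.mk [])
        = pvInit := by
      rw [PySem.Dict.getD_eq_get?_getD, pv_get?_mk_append _ _ _ hne]; rfl
    unfold pvBStep
    simp only [hcont, Bool.false_eq_true, if_false, hout1, hget]
    rw [pvInit_eq, pv_insert_mk_map _ _ _ _ hc]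
    have hcont2 : (PySem.Dict.mk ((PySem.List.dedup (l.map (fun p => p.1.1))).map (fun m' =>
            (m', PySem.Dict.mk (pvCats.map (fun c' => (c', pvLook l (m', c')))))) ++ [(m, PySem.Dict.mk (pvCats.map (fun c => (c, (0 : Int)))))])).contains m = true := by
      simp [PySem.Dict.contains_mk]
    unfold pvCanonB
    apply pv_dict_eq_of_items
    rw [PySem.Dict.items_insert, hcont2, if_pos rfl]
    rw [List.map_append]
    rw [hL, PySem.Set.add_of_not_mem hmL, List.map_append]
    congr 1
    · rw [List.map_map]
      apply List.map_congr_left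
      intro m' hm'
      have hmm : m' ≠ m := fun h => hmL (h ▸ hm')
      simp only [Function.comp_apply, beq_iff_eq, hmm, if_false]
      congr 2
      apply List.map_congr_left
      intro c' _
      have hne2 : ((m', c') : String × String) ≠ (m, c) := by simp [Prod.ext_iff, hmm]
      simp [hlook, hne2]
    · have hzero : ∀ c', pvLook l (m, c') = 0 := by
        intro c'
        apply pvLook_eq_zero
        intro hmem
        exact hm (List.mem_map.mpr (by
          obtain ⟨p, hp, hpe⟩ := List.mem_map.mp hmem
          exact ⟨p, hp, by rw [hpe]⟩))
      simp only [List.map_cons, List.map_nil, beq_self_eq_true, if_true]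
      congr 3
      apply List.map_congr_left
      intro c' _
      by_cases hcc : c' = c
      · subst hcc; simp [hlook]
      · have hne2 : ((m, c') : String × String) ≠ (m, c) := by simp [hcc]
        simp [hlook, hne2, hzero, hcc]

theorem pv_mainA (E : List (String × String)) (h : ∀ e ∈ E, e.2 ∈ pvCats) :
    E.foldl pvAStep PySem.Dict.empty = pvCanon E := by
  induction E using List.reverseRecOn with
  | nil => rfl
  | append_singleton E e ih =>
    rw [List.foldl_append, List.foldl_cons, List.foldl_nil,
      ih (fun x hx => h x (by simp [hx])), pv_stepA_canon _ _ (h e (by simp))]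

theorem pv_mainB (l : List ((String × String) × Int)) (hnd : (l.map Prod.fst).Nodup)
    (h : ∀ p ∈ l, p.1.2 ∈ pvCats) :
    l.foldl pvBStep PySem.Dict.empty = pvCanonB l := by
  induction l using List.reverseRecOn with
  | nil => rfl
  | append_singleton l p ih =>
    have hmap : ((l ++ [p]).map Prod.fst) = l.map Prod.fst ++ [p.1] := by simp
    rw [hmap] at hnd
    have hk : p.1 ∉ l.map Prod.fst := by
      intro hmem
      exact (List.disjoint_of_nodup_append hnd) hmem (by simp)
    rw [List.foldl_append, List.foldl_cons, List.foldl_nil,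
      ih (hnd.of_append_left) (fun x hx => h x (by simp [hx]))]
    have := pv_stepB_canon l p.1 p.2 hk (h p (by simp))
    simpa using this

theorem pv_look_map_self (l : List (String × String)) (f : String × String → Int) (k : String × String) :
    pvLook (l.map (fun x => (x, f x))) k = if k ∈ l then f k else 0 := by
  induction l with
  | nil => simp [pvLook]
  | cons a t ih =>
    simp only [List.map_cons, pvLook]
    by_cases h : a = k
    · subst h; simp
    · rw [if_neg h, ih]
      by_cases hk : k ∈ t
      · rw [if_pos hk, if_pos (List.mem_cons_of_mem _ hk)]
      · rw [if_neg hk, if_neg (by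
          rw [List.mem_cons]
          rintro (rfl | hkk)
          · exact h rfl
          · exact hk hkk)]

theorem pv_ofList_map_fst (E : List (String × String)) :
    PySem.Set.ofList ((PySem.Set.ofList E).map Prod.fst) = PySem.Set.ofList (E.map Prod.fst) := by
  induction E using List.reverseRecOn with
  | nil => rfl
  | append_singleton E x ih =>
    have hmapE : ((E ++ [x]).map Prod.fst) = E.map Prod.fst ++ [x.1] := by simp
    rw [PySem.Set.ofList_append_singleton, hmapE, PySem.Set.ofList_append_singleton]
    by_cases hx : x ∈ PySem.Set.ofList E
    · rw [PySem.Set.add_of_mem hx, ih]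
      have hx1 : x.1 ∈ PySem.Set.ofList (E.map Prod.fst) := by
        rw [PySem.Set.mem_ofList]
        exact List.mem_map.mpr ⟨x, (PySem.Set.mem_ofList _ _).mp hx, rfl⟩
      rw [PySem.Set.add_of_mem hx1]
    · rw [PySem.Set.add_of_not_mem hx, List.map_append, List.map_cons, List.map_nil,
        PySem.Set.ofList_append_singleton, ih]

theorem pv_dedup_map_fst_ofList (E : List (String × String)) :
    PySem.List.dedup ((PySem.Set.ofList E).map Prod.fst) = PySem.List.dedup (E.map Prod.fst) := by
  rw [PySem.List.dedup_eq_ofList, PySem.List.dedup_eq_ofList]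
  exact pv_ofList_map_fst E

theorem pv_bridge (E : List (String × String)) :
    pvCanonB ((PySem.Dict.counter E).items) = pvCanon E := by
  unfold pvCanonB pvCanon
  rw [PySem.Dict.items_counter]
  congr 1
  rw [List.map_map]
  have hfst : ((PySem.Set.ofList E).map ((fun p => p.1.1) ∘ (fun k => (k, (E.count k : Int)))))
      = (PySem.Set.ofList E).map Prod.fst := by
    apply List.map_congr_left; intro x _; rfl
  rw [hfst, pv_dedup_map_fst_ofList]
  apply List.map_congr_left
  intro m _
  congr 1
  congr 1
  apply List.map_congr_left
  intro c _
  congr 1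
  rw [pv_look_map_self]
  by_cases hmem : ((m, c) : String × String) ∈ PySem.Set.ofList E
  · rw [if_pos hmem]
  · rw [if_neg hmem]
    have : ((m, c) : String × String) ∉ E := fun hh => hmem ((PySem.Set.mem_ofList _ _).mpr hh)
    rw [List.count_eq_zero.mpr this]
    rfl

def pvOppEv (cat : String) (opp : List (String × String)) : Option (String × String) :=
  let rid := PySem.Str.strip (((PySem.Dict.mk opp).get? "opportunity_id").getD "")
  if rid = "" then none else some (pvExtractMarket rid, cat)

def pvEvents (strategy : List (String × List (List (String × String)))) : List (String × String) :=
  (((PySem.Dict.mk strategy).get? "prioritized_opportunities").getD []).filterMap (pvOppEv "prioritized")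
  ++ (((PySem.Dict.mk strategy).get? "monitor_opportunities").getD []).filterMap (pvOppEv "monitor")
  ++ (((PySem.Dict.mk strategy).get? "deprioritized_opportunities").getD []).filterMap (pvOppEv "deprioritized")

def pvOut (d : PySem.Dict String (PySem.Dict String Int)) : List (String × List (String × Int)) :=
  d.items.map (fun p => (p.1, p.2.items))

theorem pv_ofList_init :
    PySem.Dict.ofList [("prioritized", (0 : Int)), ("monitor", 0), ("deprioritized", 0)] = pvInit := rfl

theorem pv_events_cats (strategy : List (String × List (List (String × String)))) :
    ∀ e ∈ pvEvents strategy, e.2 ∈ pvCats := by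
  intro e he
  have hgen : ∀ (cat : String) (l : List (List (String × String))),
      e ∈ l.filterMap (pvOppEv cat) → e.2 = cat := by
    intro cat l hmem
    obtain ⟨opp, _, hsome⟩ := List.mem_filterMap.mp hmem
    by_cases h : PySem.Str.strip (((PySem.Dict.mk opp).get? "opportunity_id").getD "") = ""
    · rw [show pvOppEv cat opp = none from by unfold pvOppEv; rw [if_pos h]] at hsome
      cases hsome
    · rw [show pvOppEv cat opp = some (pvExtractMarket (PySem.Str.strip (((PySem.Dict.mk opp).get? "opportunity_id").getD "")), cat) from by
        unfold pvOppEv; rw [if_neg h]] at hsome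
      rw [← Option.some.inj hsome]
  unfold pvEvents at he
  rcases List.mem_append.mp he with h1 | h2
  · rcases List.mem_append.mp h1 with ha | hb
    · rw [hgen _ _ ha]; simp [pvCats]
    · rw [hgen _ _ hb]; simp [pvCats]
  · rw [hgen _ _ h2]; simp [pvCats]

theorem pv_loopA (cat : String) (l : List (List (String × String)))
    (init : PySem.Dict String (PySem.Dict String Int)) :
    l.foldl (fun out opp =>
      let ref := PySem.Str.strip (((PySem.Dict.mk opp).get? "opportunity_id").getD "")
      if ref = "" then out
      else
        let m := pvExtractMarket ref
        let out1 := if out.contains m then out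
          else out.insert m (PySem.Dict.ofList [("prioritized", 0), ("monitor", 0), ("deprioritized", 0)])
        out1.insert m ((out1.getD m (PySem.Dict.mk [])).insert cat
          ((out1.getD m (PySem.Dict.mk [])).getD cat 0 + 1))) init
    = (l.filterMap (pvOppEv cat)).foldl pvAStep init := by
  rw [List.foldl_filterMap]
  apply PySem.List.foldl_congr_mem
  intro out opp _
  by_cases h : PySem.Str.strip (((PySem.Dict.mk opp).get? "opportunity_id").getD "") = ""
  · rw [show pvOppEv cat opp = none from by unfold pvOppEv; rw [if_pos h]]
    simp only [if_pos h]
  · rw [show pvOppEv cat opp = some (pvExtractMarket (PySem.Str.strip (((PySem.Dict.mk opp).get? "opportunity_id").getD "")), cat) from by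
      unfold pvOppEv; rw [if_neg h]]
    simp only [if_neg h]
    have hA : ∀ (o : PySem.Dict String (PySem.Dict String Int)) (a : String),
        pvAStep o (a, cat)
          = (let out1 := if o.contains a then o else o.insert a pvInit
             out1.insert a ((out1.getD a (PySem.Dict.mk [])).insert cat
               ((out1.getD a (PySem.Dict.mk [])).getD cat 0 + 1))) := fun o a => rfl
    rw [pv_ofList_init]
    exact (hA out _).symm

theorem pv_loopB (cat : String) (l : List (List (String × String)))
    (init : PySem.Dict (String × String) Int) :
    l.foldl (fun flat opp =>
      let rid := PySem.Str.strip (((PySem.Dict.mk opp).get? "opportunity_id").getD "")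
      if rid = "" then flat
      else
        let k := (pvExtractMarket rid, cat)
        flat.insert k (flat.getD k 0 + 1)) init
    = (l.filterMap (pvOppEv cat)).foldl (fun d e => d.insert e (d.getD e 0 + 1)) init := by
  rw [List.foldl_filterMap]
  apply PySem.List.foldl_congr_mem
  intro flat opp _
  by_cases h : PySem.Str.strip (((PySem.Dict.mk opp).get? "opportunity_id").getD "") = ""
  · rw [show pvOppEv cat opp = none from by unfold pvOppEv; rw [if_pos h]]
    simp only [if_pos h]
  · rw [show pvOppEv cat opp = some (pvExtractMarket (PySem.Str.strip (((PySem.Dict.mk opp).get? "opportunity_id").getD "")), cat) from by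
      unfold pvOppEv; rw [if_neg h]]
    simp only [if_neg h]

theorem pv_portA (strategy : List (String × List (List (String × String)))) :
    count_by_market_from_strategy_py strategy
      = pvOut ((pvEvents strategy).foldl pvAStep PySem.Dict.empty) := by
  unfold count_by_market_from_strategy_py
  rw [List.foldl_cons, List.foldl_cons, List.foldl_cons, List.foldl_nil]
  rw [pv_loopA "prioritized", pv_loopA "monitor", pv_loopA "deprioritized"]
  unfold pvEvents pvOut
  rw [List.foldl_append, List.foldl_append]

theorem pv_portB (strategy : List (String × List (List (String × String)))) :
    count_by_market_from_strategy_py_alt strategy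
      = pvOut (((PySem.Dict.counter (pvEvents strategy)).items).foldl pvBStep PySem.Dict.empty) := by
  unfold count_by_market_from_strategy_py_alt
  rw [show pvCats = ["prioritized", "monitor", "deprioritized"] from rfl]
  rw [List.foldl_cons, List.foldl_cons, List.foldl_cons, List.foldl_nil]
  rw [pv_loopB "prioritized", pv_loopB "monitor", pv_loopB "deprioritized"]
  rw [show ("prioritized" ++ "_opportunities" : String) = "prioritized_opportunities" from rfl,
      show ("monitor" ++ "_opportunities" : String) = "monitor_opportunities" from rfl,
      show ("deprioritized" ++ "_opportunities" : String) = "deprioritized_opportunities" from rfl]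
  rw [← List.foldl_append, ← List.foldl_append, ← List.append_assoc]
  rw [show ((((PySem.Dict.mk strategy).get? "prioritized_opportunities").getD []).filterMap (pvOppEv "prioritized")
      ++ (((PySem.Dict.mk strategy).get? "monitor_opportunities").getD []).filterMap (pvOppEv "monitor")
      ++ (((PySem.Dict.mk strategy).get? "deprioritized_opportunities").getD []).filterMap (pvOppEv "deprioritized"))
      = pvEvents strategy from rfl]
  rw [PySem.Dict.foldl_insert_getD_add_one_eq_counter]
  have hstep2 : (fun (out : PySem.Dict String (PySem.Dict String Int)) (e : (String × String) × Int) =>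
      let out1 := if out.contains e.1.1 then out
        else out.insert e.1.1 (PySem.Dict.ofList ((["prioritized", "monitor", "deprioritized"] : List String).map (fun c => (c, 0))))
      out1.insert e.1.1 ((out1.getD e.1.1 (PySem.Dict.mk [])).insert e.1.2 e.2)) = pvBStep := by
    funext out e
    rw [show PySem.Dict.ofList ((["prioritized", "monitor", "deprioritized"] : List String).map (fun c => (c, (0 : Int)))) = pvInit from rfl]
    rfl
  rw [hstep2]
  rfl

theorem pv_final (strategy : List (String × List (List (String × String)))) :
    count_by_market_from_strategy_py strategy = count_by_market_from_strategy_py_alt strategy := by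
  have hnd : (((PySem.Dict.counter (pvEvents strategy)).items).map Prod.fst).Nodup := by
    rw [PySem.Dict.items_counter, List.map_map]
    have : ((Prod.fst ∘ fun k => (k, ((pvEvents strategy).count k : Int)))) = id := by
      funext k; rfl
    rw [this, List.map_id]
    exact PySem.Set.nodup_ofList _
  have hcats : ∀ p ∈ (PySem.Dict.counter (pvEvents strategy)).items, p.1.2 ∈ pvCats := by
    intro p hp
    rw [PySem.Dict.items_counter] at hp
    obtain ⟨k, hk, rfl⟩ := List.mem_map.mp hp
    exact pv_events_cats strategy k ((PySem.Set.mem_ofList _ _).mp hk)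
  rw [pv_portA, pv_portB, pv_mainA _ (pv_events_cats strategy), pv_mainB _ hnd hcats, pv_bridge]

-- ===== VERDICT (by name: the statement is the Claim_ definition above) =====
theorem count_by_market_from_strategy_py_spec : Claim_equal_count_by_market_from_strategy_py := by
  intro strategy _
  unfold Spec_count_by_market_from_strategy_py
  exact pv_final strategy
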